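-- pv_equiv track=rewrite | github.com/yash-saini/Emotion-analysis-of-Tweets-from-top-3-colleges-of-the-world. | Assigning_Sentiments.py | rem_substring
-- ===== SOURCE A (Python) =====
-- def rem_substring(tweets,substring):
--     m=0;
--     for i in tweets:
--         if (substring in i):
--         #while i.find(substring)!=-1:
--             k=i.find(substring)
--             d=i.find(' ',k,len(i))
--             if d!=-1:               #substring is present somwhere in the middle(not the end of the string)
--                 i=i[:k]+i[d:]
--             else:                   #special case when the substring is present at the end, we needn't append the
--                 i=i[:k]             #substring after the junk string to our result
--         tweets[m]=i #store the result in tweets "list"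
--         m+= 1
--     return tweets
-- ===== SOURCE B (Python) =====
-- def rem_substring(tweets, substring):
--     # word-based: split each tweet on spaces, truncate the first word containing
--     # the substring at the match, rejoin; mutates tweets in place like A
--     for m, t in enumerate(tweets):
--         words = t.split(' ')
--         for j, w in enumerate(words):
--             k = w.find(substring)
--             if k != -1:
--                 words[j] = w[:k]
--                 break
--         tweets[m] = ' '.join(words)
--     return tweets
-- ===== Notes on version B (the rewrite author's own statement) =====
-- stated objective: alternative
-- what changed: B tokenizes each tweet with split(' '), truncates the first word that contains the substring at the match, and rejoins with ' '.join, instead of A's character-index arithmetic (two str.find calls and slice splicing on the raw string).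
-- intended difference: When the substring contains a space but does not start with one and occurs in some tweet (a match necessarily spanning a word boundary), A deletes only from the match start up to the space inside the match, leaving the pattern half-removed; B treats such a pattern as matching no single word and leaves the tweet unchanged, the intended behaviour for removing a word containing the substring. — e.g. on rem_substring(["a b c"], "a b"): A returns [" b c"], B returns ["a b c"]
import Mathlib
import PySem

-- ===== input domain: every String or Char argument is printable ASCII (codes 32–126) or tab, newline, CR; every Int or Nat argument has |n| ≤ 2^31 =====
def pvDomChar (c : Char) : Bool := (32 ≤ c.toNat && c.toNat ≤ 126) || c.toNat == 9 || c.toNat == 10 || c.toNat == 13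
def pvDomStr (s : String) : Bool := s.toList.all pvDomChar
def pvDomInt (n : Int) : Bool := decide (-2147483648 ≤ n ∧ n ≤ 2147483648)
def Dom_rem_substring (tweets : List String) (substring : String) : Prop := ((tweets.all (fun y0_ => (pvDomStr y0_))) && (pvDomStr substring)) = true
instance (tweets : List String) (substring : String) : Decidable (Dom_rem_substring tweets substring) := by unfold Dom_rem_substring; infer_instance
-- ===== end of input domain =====

-- B rebuilds each tweet word-by-word (split(' ') / truncate first matching word / ' '.join)
-- instead of A's index arithmetic (find, find-space, slice splice); objective: alternative, not faster.
-- Both Pythons mutate the input list in place; the theorems are about the return value.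

-- ===== PORT A =====
-- body of A's loop for one tweet i (on code points; PySem.Chars.* are the string primitives)
def cutA (i sub : List Char) : List Char :=
  if PySem.Chars.isIn sub i then
    -- k = i.find(substring); d = i.find(' ', k, len(i))
    let k := PySem.Chars.find i sub
    let d := PySem.Chars.findFrom i [' '] k (some (PySem.Chars.len i))
    if d ≠ -1 then
      PySem.Chars.slice i none (some k) ++ PySem.Chars.slice i (some d) none  -- i[:k]+i[d:]
    else
      PySem.Chars.slice i none (some k)                                       -- i[:k]
  else i

-- the loop 'for i in tweets: … tweets[m] = i; m += 1' (in-place index update = rebuilt list)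
def rem_substring (tweets : List String) (substring : String) : List String :=
  tweets.foldl (fun acc i => acc ++ [String.ofList (cutA i.toList substring.toList)]) []

-- ===== PORT B =====
-- Source B's inner loop over enumerate(words): first word w with w.find(substring) != -1
-- is replaced by w[:k] and the loop breaks; later words are kept as they are.
def replaceFirstW (sub : List Char) : List (List Char) → List (List Char)
  | [] => []
  | w :: ws =>
    let k := PySem.Chars.find w sub
    if k ≠ -1 then PySem.Chars.slice w none (some k) :: ws
    else w :: replaceFirstW sub ws

-- one tweet: words = t.split(' '); …inner loop…; ' '.join(words)
def cutW (sub t : List Char) : List Char :=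
  PySem.Chars.join [' '] (replaceFirstW sub (PySem.Chars.splitOn t [' ']))

-- the outer loop 'for m, t in enumerate(tweets): … tweets[m] = …'
def rem_substring_alt (tweets : List String) (substring : String) : List String :=
  tweets.map (fun t => String.ofList (cutW substring.toList t.toList))

-- ===== PRECONDITION & SPEC =====
-- When the substring contains a space but does not start with one and occurs in some tweet
-- (a match necessarily spanning a word boundary), A deletes only from the match start up to
-- the space inside the match, leaving the pattern half-removed; B treats such a pattern as
-- matching no single word and leaves the tweet unchanged — the intended behaviour for
-- removing a word containing the substring.
def D_rem_substring (tweets : List String) (substring : String) : Prop :=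
  ' ' ∈ substring.toList ∧ substring.toList.head? ≠ some ' ' ∧
    ∃ t ∈ tweets, substring.toList <:+: t.toList
instance (tweets : List String) (substring : String) : Decidable (D_rem_substring tweets substring) := by
  unfold D_rem_substring; infer_instance

def Spec_rem_substring (tweets : List String) (substring : String) (out : List String) : Prop :=
  ¬ D_rem_substring tweets substring → out = rem_substring_alt tweets substring
instance (tweets : List String) (substring : String) (out : List String) : Decidable (Spec_rem_substring tweets substring out) := by
  unfold Spec_rem_substring; infer_instance

def pvDiffWitness_rem_substring : List String × String := (["a b c"], "a b")
def pvDiffWitnessOut_rem_substring : (List String) × (List String) := ([" b c"], ["a b c"])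

-- ===== CLAIM =====
def Claim_unchanged_rem_substring : Prop := ∀ (tweets : List String) (substring : String),
  Dom_rem_substring tweets substring → Spec_rem_substring tweets substring (rem_substring tweets substring)
def Claim_changed_rem_substring : Prop :=
  Dom_rem_substring (pvDiffWitness_rem_substring.1) (pvDiffWitness_rem_substring.2) ∧
  D_rem_substring (pvDiffWitness_rem_substring.1) (pvDiffWitness_rem_substring.2) ∧
  rem_substring (pvDiffWitness_rem_substring.1) (pvDiffWitness_rem_substring.2) = pvDiffWitnessOut_rem_substring.1 ∧
  rem_substring_alt (pvDiffWitness_rem_substring.1) (pvDiffWitness_rem_substring.2) = pvDiffWitnessOut_rem_substring.2 ∧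
  pvDiffWitnessOut_rem_substring.1 ≠ pvDiffWitnessOut_rem_substring.2
def Claim_exact_rem_substring : Prop := ∀ (tweets : List String) (substring : String),
  Dom_rem_substring tweets substring → D_rem_substring tweets substring →
  rem_substring tweets substring ≠ rem_substring_alt tweets substring

-- ===== LEMMAS AND PROOFS =====

-- ---- generic scanner characterisation of A's per-tweet body (proof-side only) ----

-- a reference scanner: walk to the first offset where sub is a prefix, then skip to the next space
def cutB (sub : List Char) : List Char → List Char
  | [] => []
  | c :: t =>
    if PySem.Chars.startswith (c :: t) sub then
      (c :: t).dropWhile (fun ch => ch ≠ ' ')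
    else
      c :: cutB sub t

theorem cutB_cons (sub : List Char) (c : Char) (t : List Char) :
    cutB sub (c :: t)
      = if PySem.Chars.startswith (c :: t) sub then (c :: t).dropWhile (fun ch => ch ≠ ' ')
        else c :: cutB sub t := rfl

-- dropWhile skips a block of characters the predicate accepts
theorem dropWhile_append_of_forall (xs ys : List Char) (h : ∀ x ∈ xs, x ≠ ' ') :
    (xs ++ ys).dropWhile (fun ch => ch ≠ ' ') = ys.dropWhile (fun ch => ch ≠ ' ') := by
  induction xs with
  | nil => simp
  | cons z zs ihz =>
    rw [List.cons_append, List.dropWhile_cons]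
    rw [if_pos (by simp [h z List.mem_cons_self])]
    exact ihz (fun x hx => h x (List.mem_cons_of_mem _ hx))

-- a singleton pattern is a prefix iff the head is that character
theorem singleton_prefix_iff (x : Char) (l : List Char) : [x] <+: l ↔ ∃ t, l = x :: t := by
  constructor
  · rintro ⟨t, rfl⟩; exact ⟨t, rfl⟩
  · rintro ⟨t, rfl⟩; exact ⟨t, rfl⟩

-- find(' ', k, len(i)): an end bound equal to the length is the same as no end bound
theorem findFrom_end_len (s sub : List Char) (k : Int) :
    PySem.Chars.findFrom s sub k (some (PySem.Chars.len s)) = PySem.Chars.findFrom s sub k none := by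
  have h0 : ¬((s.length : Int) < 0) := Int.not_lt.mpr (Int.natCast_nonneg _)
  simp [PySem.Chars.findFrom, PySem.Chars.len, h0]

-- the skip-to-space step: dropWhile jumps exactly to the first space
theorem dropWhile_eq_drop_find_space (t : List Char) (j : Nat) (hj : [' '] <+: t.drop j)
    (hmin : ∀ i, i < j → ¬ [' '] <+: t.drop i) :
    t.dropWhile (fun ch => ch ≠ ' ') = t.drop j := by
  induction t generalizing j with
  | nil => simp at hj
  | cons c t ih =>
    cases j with
    | zero =>
      obtain ⟨r, hr⟩ := (singleton_prefix_iff _ _).mp hj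
      simp only [List.drop_zero] at hr
      cases hr
      simp [List.dropWhile]
    | succ j =>
      have hc : c ≠ ' ' := by
        intro heq
        exact hmin 0 (Nat.succ_pos _) ((singleton_prefix_iff _ _).mpr ⟨t, by simp [heq]⟩)
      simp only [List.dropWhile, List.drop_succ_cons]
      simp only [ne_eq, hc, not_false_eq_true, decide_true]
      exact ih j hj (fun i hi => hmin (i+1) (by omega))

-- no space in the remainder: the skip runs to the end
theorem dropWhile_eq_nil_of_no_space (t : List Char) (h : ¬ ([' '] <:+: t)) :
    t.dropWhile (fun ch => ch ≠ ' ') = [] := by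
  rw [List.dropWhile_eq_nil_iff]
  intro x hx
  simp only [ne_eq, decide_eq_true_eq]
  intro heq
  subst heq
  exact h ((List.singleton_infix_iff ' ' t).mpr hx)

-- the scanner with no occurrence anywhere: the tweet is unchanged
theorem cutB_of_not_infix (sub : List Char) : ∀ s : List Char, ¬ sub <:+: s → cutB sub s = s := by
  intro s
  induction s with
  | nil => intro _; rfl
  | cons c t ih =>
    intro h
    rw [List.infix_cons_iff] at h
    push Not at h
    unfold cutB
    rw [if_neg, ih h.2]
    simp only [PySem.Chars.startswith_iff]
    exact h.1

-- the scanner with first occurrence at k: prefix kept, word skipped from k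
theorem cutB_of_minimal (sub : List Char) : ∀ (s : List Char) (k : Nat), sub <+: s.drop k →
    (∀ i, i < k → ¬ sub <+: s.drop i) →
    cutB sub s = s.take k ++ (s.drop k).dropWhile (fun ch => ch ≠ ' ') := by
  intro s
  induction s with
  | nil =>
    intro k hk hmin
    simp at hk
    have hk0 : k = 0 := by
      by_contra h
      exact hmin 0 (by omega) (by simp [hk])
    subst hk0
    simp [cutB]
  | cons c t ih =>
    intro k hk hmin
    cases k with
    | zero =>
      simp only [List.drop_zero] at hk
      unfold cutB
      rw [if_pos (by rw [PySem.Chars.startswith_iff]; exact hk)]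
      simp
    | succ k =>
      have hns : ¬ sub <+: (c :: t) := hmin 0 (Nat.succ_pos _)
      unfold cutB
      rw [if_neg (by rw [PySem.Chars.startswith_iff]; exact hns)]
      simp only [List.drop_succ_cons] at hk ⊢
      rw [ih k hk (fun i hi => hmin (i+1) (by omega))]
      simp

-- A's per-tweet body is the scanner
theorem cutA_eq_cutB (s sub : List Char) : cutA s sub = cutB sub s := by
  simp only [cutA]
  by_cases hin : PySem.Chars.isIn sub s = true
  · rw [if_pos hin]
    have hinf : sub <:+: s := (PySem.Chars.isIn_iff_infix sub s).mp hin
    have hk0 : 0 ≤ PySem.Chars.find s sub := (PySem.Chars.find_nonneg_iff s sub).mpr hinf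
    obtain ⟨hpre, hmin⟩ := PySem.Chars.find_spec hk0
    set k : Nat := (PySem.Chars.find s sub).toNat with hkdef
    have hkcast : PySem.Chars.find s sub = (k : Int) := (Int.toNat_of_nonneg hk0).symm
    have hkle : k ≤ s.length := by
      have := PySem.Chars.find_le_length s sub
      omega
    rw [cutB_of_minimal sub s k hpre hmin]
    rw [findFrom_end_len, hkcast, PySem.Chars.findFrom_natCast s [' '] k hkle]
    have htake : PySem.Chars.slice s none (some (k : Int)) = s.take k := by
      simp [PySem.Chars.slice_eq_listSlice, PySem.List.slice_to_natCast]
    by_cases hj : PySem.Chars.find (s.drop k) [' '] = -1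
    · rw [if_pos hj]
      simp only [ne_eq, not_true_eq_false, if_false, htake]
      rw [dropWhile_eq_nil_of_no_space _ ((PySem.Chars.find_eq_neg_one_iff _ _).mp hj)]
      simp
    · rw [if_neg hj]
      have hj0 : 0 ≤ PySem.Chars.find (s.drop k) [' '] := by
        have := PySem.Chars.neg_one_le_find (s.drop k) [' ']
        omega
      obtain ⟨hjpre, hjmin⟩ := PySem.Chars.find_spec hj0
      set j : Nat := (PySem.Chars.find (s.drop k) [' ']).toNat with hjdef
      have hd : (k : Int) + PySem.Chars.find (s.drop k) [' '] ≠ -1 := by omega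
      rw [if_pos hd, htake]
      have hdrop : PySem.Chars.slice s (some ((k : Int) + PySem.Chars.find (s.drop k) [' '])) none
          = s.drop (k + j) := by
        have : (k : Int) + PySem.Chars.find (s.drop k) [' '] = ((k + j : Nat) : Int) := by omega
        rw [this, PySem.Chars.slice_eq_listSlice]
        exact PySem.List.slice_from_natCast s (k + j)
      rw [hdrop, dropWhile_eq_drop_find_space (s.drop k) j hjpre hjmin, List.drop_drop]
  · rw [if_neg hin]
    exact (cutB_of_not_infix sub s ((PySem.Chars.isIn_eq_false_iff sub s).mp (by simpa using hin))).symm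

-- ---- structural split on ' ' and its relation to PySem.Chars.splitOn ----

def splitSp : List Char → List (List Char)
  | [] => [[]]
  | c :: t =>
    if c = ' ' then [] :: splitSp t
    else
      match splitSp t with
      | [] => [[c]]
      | w :: ws => (c :: w) :: ws

theorem splitSp_ne_nil (s : List Char) : splitSp s ≠ [] := by
  cases s with
  | nil => simp [splitSp]
  | cons c t =>
    simp only [splitSp]
    split_ifs
    · simp
    · cases h : splitSp t <;> simp

theorem splitSp_cons_space (t : List Char) : splitSp (' ' :: t) = [] :: splitSp t := by
  simp [splitSp]

theorem splitSp_cons_ne (c : Char) (t w : List Char) (ws : List (List Char))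
    (hc : c ≠ ' ') (hws : splitSp t = w :: ws) : splitSp (c :: t) = (c :: w) :: ws := by
  simp [splitSp, hc, hws]

-- splitOn.go with enough fuel is the obvious tail recursion
theorem splitOn_go_spec : ∀ (fuel : Nat) (l cur : List Char) (acc : List (List Char)),
    l.length < fuel →
    PySem.Chars.splitOn.go [' '] fuel l cur acc =
      acc.reverse ++ ((cur.reverse ++ (splitSp l).headI) :: (splitSp l).tail) := by
  intro fuel
  induction fuel with
  | zero => intro l cur acc h; omega
  | succ fuel ih =>
    intro l cur acc h
    cases l with
    | nil => simp [PySem.Chars.splitOn.go, splitSp, List.headI]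
    | cons c rest =>
      simp only [List.length_cons] at h
      by_cases hc : c = ' '
      · subst hc
        have hpre : [' '].isPrefixOf (' ' :: rest) = true := by simp [List.isPrefixOf]
        rw [show PySem.Chars.splitOn.go [' '] (fuel+1) (' ' :: rest) cur acc
              = PySem.Chars.splitOn.go [' '] fuel (List.drop [' '].length (' ' :: rest)) []
                  (cur.reverse :: acc) by simp [PySem.Chars.splitOn.go, hpre]]
        simp only [List.length_cons, List.length_nil, List.drop_succ_cons, List.drop_zero]
        rw [ih rest [] (cur.reverse :: acc) (by omega)]
        obtain ⟨w, ws, hws⟩ : ∃ w ws, splitSp rest = w :: ws := by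
          cases hx : splitSp rest with
          | nil => exact absurd hx (splitSp_ne_nil rest)
          | cons w ws => exact ⟨w, ws, rfl⟩
        simp [splitSp, hws, List.headI]
      · have hpre : [' '].isPrefixOf (c :: rest) = false := by
          simp [List.isPrefixOf]
          intro h'; exact absurd h'.symm hc
        rw [show PySem.Chars.splitOn.go [' '] (fuel+1) (c :: rest) cur acc
              = PySem.Chars.splitOn.go [' '] fuel rest (c :: cur) acc by
            simp [PySem.Chars.splitOn.go, hpre]]
        rw [ih rest (c :: cur) acc (by omega)]
        obtain ⟨w, ws, hws⟩ : ∃ w ws, splitSp rest = w :: ws := by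
          cases hx : splitSp rest with
          | nil => exact absurd hx (splitSp_ne_nil rest)
          | cons w ws => exact ⟨w, ws, rfl⟩
        simp [splitSp, hc, hws, List.headI]

theorem splitOn_eq_splitSp (s : List Char) : PySem.Chars.splitOn s [' '] = splitSp s := by
  unfold PySem.Chars.splitOn
  rw [splitOn_go_spec (s.length + 1) s [] [] (by omega)]
  obtain ⟨w, ws, hws⟩ : ∃ w ws, splitSp s = w :: ws := by
    cases hx : splitSp s with
    | nil => exact absurd hx (splitSp_ne_nil s)
    | cons w ws => exact ⟨w, ws, rfl⟩
  simp [hws, List.headI]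

-- join is the inverse of the split
-- join over a cons of words peels the head character
theorem join_cons_head (c : Char) (w : List Char) (l : List (List Char)) :
    PySem.Chars.join [' '] ((c :: w) :: l) = c :: PySem.Chars.join [' '] (w :: l) := by
  cases l with
  | nil => rw [PySem.Chars.join_singleton, PySem.Chars.join_singleton]
  | cons v vs =>
    rw [PySem.Chars.join_cons_cons, PySem.Chars.join_cons_cons]
    simp

theorem join_splitSp (s : List Char) : PySem.Chars.join [' '] (splitSp s) = s := by
  induction s with
  | nil => simp [splitSp, PySem.Chars.join_singleton]
  | cons c t ih =>
    obtain ⟨w, ws, hws⟩ : ∃ w ws, splitSp t = w :: ws := by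
      cases hx : splitSp t with
      | nil => exact absurd hx (splitSp_ne_nil t)
      | cons w ws => exact ⟨w, ws, rfl⟩
    by_cases hc : c = ' '
    · subst hc
      rw [splitSp_cons_space, hws, PySem.Chars.join_cons_cons]
      rw [hws] at ih
      simp [ih]
    · rw [splitSp_cons_ne c t w ws hc hws, join_cons_head]
      rw [hws] at ih
      rw [ih]

-- every word produced by the split is space-free
theorem splitSp_no_space (s : List Char) : ∀ w ∈ splitSp s, ' ' ∉ w := by
  induction s with
  | nil => simp [splitSp]
  | cons c t ih =>
    by_cases hc : c = ' '
    · subst hc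
      rw [splitSp_cons_space]
      intro w hw
      simp only [List.mem_cons] at hw
      rcases hw with rfl | hw
      · simp
      · exact ih w hw
    · obtain ⟨w, ws, hws⟩ : ∃ w ws, splitSp t = w :: ws := by
        cases hx : splitSp t with
        | nil => exact absurd hx (splitSp_ne_nil t)
        | cons w ws => exact ⟨w, ws, rfl⟩
      rw [splitSp_cons_ne c t w ws hc hws]
      intro v hv
      simp only [List.mem_cons] at hv
      rcases hv with rfl | hv
      · intro hmem
        simp only [List.mem_cons] at hmem
        rcases hmem with h | h
        · exact hc h.symm
        · exact ih w (by simp [hws]) h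
      · exact ih v (by simp [hws, hv])

theorem headI_splitSp (s : List Char) : (splitSp s).headI = s.takeWhile (fun c => c ≠ ' ') := by
  induction s with
  | nil => simp [splitSp]
  | cons c t ih =>
    by_cases hc : c = ' '
    · subst hc
      simp [splitSp]
    · obtain ⟨w, ws, hws⟩ : ∃ w ws, splitSp t = w :: ws := by
        cases hx : splitSp t with
        | nil => exact absurd hx (splitSp_ne_nil t)
        | cons w ws => exact ⟨w, ws, rfl⟩
      rw [hws] at ih
      simp only [List.headI] at ih
      simp [splitSp, hc, hws, List.headI, ih]

-- a space-free pattern that is a prefix of s is a prefix of s's first word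
theorem prefix_takeWhile_of_no_space (sub : List Char) : ∀ (s : List Char), ' ' ∉ sub → sub <+: s →
    sub <+: s.takeWhile (fun c => c ≠ ' ') := by
  induction sub with
  | nil => intro s _ _; exact List.nil_prefix
  | cons a as ih =>
    intro s hsp h
    cases s with
    | nil => exact absurd (List.eq_nil_of_prefix_nil h) (by simp)
    | cons b t =>
      rw [List.cons_prefix_cons] at h
      obtain ⟨rfl, h2⟩ := h
      have ha : a ≠ ' ' := fun he => hsp (by simp [he])
      have hTW : (a :: t).takeWhile (fun c => c ≠ ' ') = a :: t.takeWhile (fun c => c ≠ ' ') := by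
        simp [ha]
      rw [hTW, List.cons_prefix_cons]
      exact ⟨rfl, ih t (fun hm => hsp (by simp [hm])) h2⟩

-- ---- B's per-tweet body agrees with the scanner for space-free patterns ----

-- the inner loop never returns an empty word list
theorem replaceFirstW_ne_nil (sub : List Char) (l : List (List Char)) (h : l ≠ []) :
    replaceFirstW sub l ≠ [] := by
  cases l with
  | nil => exact absurd rfl h
  | cons w ws => simp only [replaceFirstW]; split_ifs <;> simp

theorem joinRF_eq_cutB (sub : List Char) (hsp : ' ' ∉ sub) :
    ∀ s, PySem.Chars.join [' '] (replaceFirstW sub (splitSp s)) = cutB sub s := by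
  intro s
  induction s with
  | nil =>
    by_cases hn : sub = []
    · subst hn; decide
    · have hfind : PySem.Chars.find [] sub = -1 := by
        rw [PySem.Chars.find_eq_neg_one_iff]
        intro hin
        exact hn (List.sublist_nil.mp hin.sublist)
      show PySem.Chars.join [' '] (replaceFirstW sub [[]]) = cutB sub []
      simp only [replaceFirstW, hfind]
      norm_num
      rfl
  | cons c t ih =>
    by_cases hc : c = ' '
    · subst hc
      rw [splitSp_cons_space]
      obtain ⟨v, vs, hvs⟩ : ∃ v vs, splitSp t = v :: vs := by
        cases hx : splitSp t with
        | nil => exact absurd hx (splitSp_ne_nil t)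
        | cons v vs => exact ⟨v, vs, rfl⟩
      by_cases hn : sub = []
      · subst hn
        have hf0 : PySem.Chars.find ([] : List Char) ([] : List Char) = 0 := by decide
        have hRF : replaceFirstW [] ([] :: splitSp t)
            = PySem.Chars.slice [] none (some 0) :: splitSp t := by
          simp [replaceFirstW, hf0]
        have hsl : PySem.Chars.slice ([] : List Char) none (some 0) = [] := by decide
        rw [hRF, hsl, hvs, PySem.Chars.join_cons_cons]
        rw [hvs] at ih
        have hj : PySem.Chars.join [' '] (v :: vs) = t := by
          have := join_splitSp t
          rwa [hvs] at this
        rw [cutB_cons, if_pos (by rw [PySem.Chars.startswith_iff]; exact List.nil_prefix)]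
        simp [hj]
      · have hfind : PySem.Chars.find [] sub = -1 := by
          rw [PySem.Chars.find_eq_neg_one_iff]
          intro hin
          exact hn (List.sublist_nil.mp hin.sublist)
        have hRF : replaceFirstW sub ([] :: splitSp t) = [] :: replaceFirstW sub (splitSp t) := by
          simp [replaceFirstW, hfind]
        rw [hRF]
        obtain ⟨x, xs, hxs⟩ : ∃ x xs, replaceFirstW sub (splitSp t) = x :: xs := by
          cases hx : replaceFirstW sub (splitSp t) with
          | nil => exact absurd hx (replaceFirstW_ne_nil sub _ (splitSp_ne_nil t))
          | cons x xs => exact ⟨x, xs, rfl⟩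
        rw [hxs, PySem.Chars.join_cons_cons]
        rw [hxs] at ih
        obtain ⟨a, as, rfl⟩ : ∃ a as, sub = a :: as := by
          cases sub with
          | nil => exact absurd rfl hn
          | cons a as => exact ⟨a, as, rfl⟩
        have ha : a ≠ ' ' := fun he => hsp (by simp [he])
        rw [cutB_cons, if_neg (by
          rw [PySem.Chars.startswith_iff]
          intro hpre
          rw [List.cons_prefix_cons] at hpre
          exact ha hpre.1)]
        simp [ih]
    · obtain ⟨w, ws, hws⟩ : ∃ w ws, splitSp t = w :: ws := by
        cases hx : splitSp t with
        | nil => exact absurd hx (splitSp_ne_nil t)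
        | cons w ws => exact ⟨w, ws, rfl⟩
      rw [splitSp_cons_ne c t w ws hc hws]
      have hTW : (c :: t).takeWhile (fun ch => ch ≠ ' ') = c :: w := by
        rw [← headI_splitSp, splitSp_cons_ne c t w ws hc hws]
        rfl
      have hword : ' ' ∉ (c :: w) := by
        apply splitSp_no_space (c :: t)
        rw [splitSp_cons_ne c t w ws hc hws]
        exact List.mem_cons_self
      by_cases hk : PySem.Chars.find (c :: w) sub = -1
      · have hnoinf : ¬ sub <:+: (c :: w) := (PySem.Chars.find_eq_neg_one_iff _ _).mp hk
        have hfw : PySem.Chars.find w sub = -1 := by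
          rw [PySem.Chars.find_eq_neg_one_iff]
          intro hin
          exact hnoinf (hin.trans (List.suffix_cons c w).isInfix)
        have hRF1 : replaceFirstW sub ((c :: w) :: ws) = (c :: w) :: replaceFirstW sub ws := by
          simp [replaceFirstW, hk]
        have hRF2 : replaceFirstW sub (w :: ws) = w :: replaceFirstW sub ws := by
          simp [replaceFirstW, hfw]
        rw [hws, hRF2] at ih
        rw [hRF1, join_cons_head, ih]
        rw [cutB_cons, if_neg (by
          rw [PySem.Chars.startswith_iff]
          intro hpre
          exact hnoinf (by
            rw [← hTW]
            exact (prefix_takeWhile_of_no_space sub (c :: t) hsp hpre).isInfix))]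
      · have hm0 : 0 ≤ PySem.Chars.find (c :: w) sub := by
          have := PySem.Chars.neg_one_le_find (c :: w) sub
          omega
        obtain ⟨hpre, hmin⟩ := PySem.Chars.find_spec hm0
        set m' : Nat := (PySem.Chars.find (c :: w) sub).toNat with hm'def
        have hmcast : PySem.Chars.find (c :: w) sub = (m' : Int) := (Int.toNat_of_nonneg hm0).symm
        have hRF1 : replaceFirstW sub ((c :: w) :: ws)
            = PySem.Chars.slice (c :: w) none (some (PySem.Chars.find (c :: w) sub)) :: ws := by
          simp [replaceFirstW, hk]
        have hslice : PySem.Chars.slice (c :: w) none (some (PySem.Chars.find (c :: w) sub))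
            = (c :: w).take m' := by
          rw [hmcast]
          simp [PySem.Chars.slice_eq_listSlice, PySem.List.slice_to_natCast]
        by_cases hm1 : m' = 0
        · have hpre0 : sub <+: (c :: w) := by
            have h2 := hpre
            rw [hm1] at h2
            simpa using h2
          rw [hRF1, hslice, hm1]
          simp only [List.take_zero]
          have hjoin : PySem.Chars.join [' '] ((c :: w) :: ws) = c :: t := by
            have := join_splitSp (c :: t)
            rwa [splitSp_cons_ne c t w ws hc hws] at this
          rw [cutB_cons, if_pos (by
            rw [PySem.Chars.startswith_iff]
            exact hpre0.trans (hTW ▸ List.takeWhile_prefix _))]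
          cases ws with
          | nil =>
            rw [PySem.Chars.join_singleton] at hjoin
            rw [PySem.Chars.join_singleton]
            rw [← hjoin]
            symm
            rw [List.dropWhile_eq_nil_iff]
            intro x hx
            by_cases hxe : x = ' '
            · exact absurd (hxe ▸ hx) hword
            · simp [hxe]
          | cons v vs =>
            rw [PySem.Chars.join_cons_cons] at hjoin
            rw [PySem.Chars.join_cons_cons]
            rw [← hjoin]
            simp only [List.append_assoc]
            rw [dropWhile_append_of_forall (c :: w) _ (fun x hx he => hword (he ▸ hx))]
            simp [List.dropWhile_cons]
        · have hnpre : ¬ sub <+: (c :: w) := by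
            have := hmin 0 (by omega)
            simpa using this
          obtain ⟨n, hn⟩ : ∃ n, m' = n + 1 := ⟨m' - 1, by omega⟩
          have hprew : sub <+: w.drop n := by
            have := hpre
            rw [hn] at this
            simpa using this
          have hinfw : sub <:+: w := by
            have hin : PySem.Chars.isIn sub w = true :=
              (PySem.Chars.exists_prefix_drop_iff_isIn sub w).mp ⟨n, hprew⟩
            exact (PySem.Chars.isIn_iff_infix _ _).mp hin
          have hfw0 : 0 ≤ PySem.Chars.find w sub := (PySem.Chars.find_nonneg_iff _ _).mpr hinfw
          obtain ⟨hprej, hminj⟩ := PySem.Chars.find_spec hfw0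
          have hjn : (PySem.Chars.find w sub).toNat = n := by
            by_contra hne
            rcases Nat.lt_or_ge (PySem.Chars.find w sub).toNat n with hlt | hge
            · exact hmin ((PySem.Chars.find w sub).toNat + 1) (by omega) (by simpa using hprej)
            · exact hminj n (by omega) hprew
          have hfw : PySem.Chars.find w sub = (n : Int) := by
            rw [← hjn]
            exact (Int.toNat_of_nonneg hfw0).symm
          have hRF2 : replaceFirstW sub (w :: ws)
              = PySem.Chars.slice w none (some (PySem.Chars.find w sub)) :: ws := by
            have : PySem.Chars.find w sub ≠ -1 := by omega
            simp [replaceFirstW, this]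
          have hslicew : PySem.Chars.slice w none (some (PySem.Chars.find w sub)) = w.take n := by
            rw [hfw]
            simp [PySem.Chars.slice_eq_listSlice, PySem.List.slice_to_natCast]
          rw [hws, hRF2, hslicew] at ih
          rw [hRF1, hslice, hn, List.take_succ_cons, join_cons_head, ih]
          rw [cutB_cons, if_neg (by
            rw [PySem.Chars.startswith_iff]
            intro hpre'
            exact hnpre (hTW ▸ prefix_takeWhile_of_no_space sub (c :: t) hsp hpre'))]

theorem cutW_eq_cutB (sub : List Char) (hsp : ' ' ∉ sub) (s : List Char) :
    cutW sub s = cutB sub s := by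
  unfold cutW
  rw [splitOn_eq_splitSp]
  exact joinRF_eq_cutB sub hsp s

-- ---- the space-containing-pattern cases ----

-- B never touches a tweet when the pattern contains a space
theorem cutW_of_space (sub : List Char) (hsp : ' ' ∈ sub) (s : List Char) : cutW sub s = s := by
  unfold cutW
  rw [splitOn_eq_splitSp]
  have hRF : ∀ l : List (List Char), (∀ w ∈ l, ' ' ∉ w) → replaceFirstW sub l = l := by
    intro l
    induction l with
    | nil => intro _; rfl
    | cons w ws ihl =>
      intro hall
      have hfw : PySem.Chars.find w sub = -1 := by
        rw [PySem.Chars.find_eq_neg_one_iff]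
        intro hin
        exact hall w (List.mem_cons_self) (hin.subset hsp)
      simp [replaceFirstW, hfw, ihl (fun x hx => hall x (List.mem_cons_of_mem _ hx))]
  rw [hRF _ (splitSp_no_space s), join_splitSp]

-- A never touches a tweet the pattern does not occur in
theorem cutA_of_not_infix (s sub : List Char) (h : ¬ sub <:+: s) : cutA s sub = s := by
  rw [cutA_eq_cutB]; exact cutB_of_not_infix sub s h

-- A never touches a tweet when the pattern starts with a space
theorem cutA_of_head_space (s sub : List Char) (h : sub.head? = some ' ') : cutA s sub = s := by
  obtain ⟨as, rfl⟩ : ∃ as, sub = ' ' :: as := by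
    cases sub with
    | nil => simp at h
    | cons a as => simp only [List.head?_cons, Option.some.injEq] at h; exact ⟨as, by rw [h]⟩
  simp only [cutA]
  by_cases hin : PySem.Chars.isIn (' ' :: as) s = true
  · rw [if_pos hin]
    have hinf := (PySem.Chars.isIn_iff_infix _ _).mp hin
    have hk0 : 0 ≤ PySem.Chars.find s (' ' :: as) := (PySem.Chars.find_nonneg_iff _ _).mpr hinf
    obtain ⟨hpre, hmin⟩ := PySem.Chars.find_spec hk0
    set k : Nat := (PySem.Chars.find s (' ' :: as)).toNat with hkdef
    have hkcast : PySem.Chars.find s (' ' :: as) = (k : Int) := (Int.toNat_of_nonneg hk0).symm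
    have hkle : k ≤ s.length := by
      have := PySem.Chars.find_le_length s (' ' :: as)
      omega
    have hsppre : [' '] <+: s.drop k := by
      obtain ⟨r, hr⟩ := hpre
      exact ⟨as ++ r, by simp [← hr]⟩
    have hf0 : PySem.Chars.find (s.drop k) [' '] = 0 := by
      have h0 : 0 ≤ PySem.Chars.find (s.drop k) [' '] :=
        (PySem.Chars.find_nonneg_iff _ _).mpr hsppre.isInfix
      obtain ⟨_, hmin0⟩ := PySem.Chars.find_spec h0
      by_contra hne
      exact hmin0 0 (by omega) (by simpa using hsppre)
    rw [findFrom_end_len, hkcast, PySem.Chars.findFrom_natCast s [' '] k hkle, hf0]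
    rw [if_neg (show ¬((0 : Int) = -1) by omega)]
    rw [if_pos (show ((k : Int) + 0) ≠ -1 by omega)]
    have htake : PySem.Chars.slice s none (some (k : Int)) = s.take k := by
      simp [PySem.Chars.slice_eq_listSlice, PySem.List.slice_to_natCast]
    have hdrop : PySem.Chars.slice s (some ((k : Int) + 0)) none = s.drop k := by
      rw [show ((k : Int) + 0) = (k : Int) by ring]
      rw [PySem.Chars.slice_eq_listSlice]
      exact PySem.List.slice_from_natCast s k
    rw [htake, hdrop, List.take_append_drop]
  · rw [if_neg hin]

-- inside D_: A strictly shortens a tweet the pattern occurs in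
theorem length_cutA_lt (s sub : List Char) (hin : sub <:+: s) (hsp : ' ' ∈ sub)
    (hh : sub.head? ≠ some ' ') : (cutA s sub).length < s.length := by
  rw [cutA_eq_cutB]
  have hk0 : 0 ≤ PySem.Chars.find s sub := (PySem.Chars.find_nonneg_iff _ _).mpr hin
  obtain ⟨hpre, hmin⟩ := PySem.Chars.find_spec hk0
  set k : Nat := (PySem.Chars.find s sub).toNat with hkdef
  have hkle : k ≤ s.length := by
    have := PySem.Chars.find_le_length s sub
    omega
  rw [cutB_of_minimal sub s k hpre hmin]
  have hspmem : ' ' ∈ s.drop k := hpre.subset hsp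
  have hp0 : 0 ≤ PySem.Chars.find (s.drop k) [' '] := by
    apply (PySem.Chars.find_nonneg_iff _ _).mpr
    exact ((List.singleton_infix_iff ' ' (s.drop k)).mpr hspmem)
  obtain ⟨hprep, hminp⟩ := PySem.Chars.find_spec hp0
  set p : Nat := (PySem.Chars.find (s.drop k) [' ']).toNat with hpdef
  have hple : p ≤ s.length - k := by
    have := PySem.Chars.find_le_length (s.drop k) [' ']
    have hl : (s.drop k).length = s.length - k := List.length_drop ..
    omega
  have hp1 : 1 ≤ p := by
    by_contra hlt
    have hp00 : p = 0 := by omega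
    rw [hp00] at hprep
    simp only [List.drop_zero] at hprep
    obtain ⟨a, as, rfl⟩ : ∃ a as, sub = a :: as := by
      cases sub with
      | nil => simp at hsp
      | cons a as => exact ⟨a, as, rfl⟩
    obtain ⟨r1, hr1⟩ := hpre
    obtain ⟨r2, hr2⟩ := hprep
    rw [← hr1] at hr2
    simp only [List.cons_append, List.cons.injEq] at hr2
    exact hh (by rw [List.head?_cons, ← hr2.1])
  rw [dropWhile_eq_drop_find_space (s.drop k) p hprep hminp, List.drop_drop]
  simp only [List.length_append, List.length_take, List.length_drop]
  omega

-- A's outer fold is a map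
theorem rem_substring_eq_map (tweets : List String) (substring : String) :
    rem_substring tweets substring
      = tweets.map (fun t => String.ofList (cutA t.toList substring.toList)) := by
  unfold rem_substring
  rw [PySem.List.foldl_append_singleton_eq_map]
  simp

-- ===== VERDICT =====
theorem rem_substring_spec : Claim_unchanged_rem_substring := by
  intro tweets substring _
  unfold Spec_rem_substring
  intro hnd
  rw [rem_substring_eq_map]
  unfold rem_substring_alt
  apply List.map_congr_left
  intro t ht
  congr 1
  by_cases hsp : ' ' ∈ substring.toList
  · rw [cutW_of_space _ hsp]
    by_cases hh : substring.toList.head? = some ' '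
    · exact cutA_of_head_space _ _ hh
    · refine cutA_of_not_infix _ _ (fun hin => hnd ?_)
      unfold D_rem_substring
      exact ⟨hsp, hh, t, ht, hin⟩
  · rw [cutA_eq_cutB, cutW_eq_cutB _ hsp]

theorem rem_substring_changed : Claim_changed_rem_substring := by
  unfold Claim_changed_rem_substring; decide

theorem rem_substring_tight : Claim_exact_rem_substring := by
  intro tweets substring _ hD heq
  unfold D_rem_substring at hD
  obtain ⟨hsp, hh, t, ht, hinf⟩ := hD
  have halt : rem_substring_alt tweets substring = tweets := by
    unfold rem_substring_alt
    conv_rhs => rw [← List.map_id tweets]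
    apply List.map_congr_left
    intro x _
    rw [cutW_of_space _ hsp]
    simp
  rw [rem_substring_eq_map, halt] at heq
  obtain ⟨i, hi, hgt⟩ := List.mem_iff_getElem.mp ht
  have h2 := congrArg (fun l => l[i]?) heq
  simp only [List.getElem?_map] at h2
  rw [List.getElem?_eq_getElem hi] at h2
  simp only [Option.map_some, Option.some.injEq] at h2
  rw [hgt] at h2
  have htl : cutA t.toList substring.toList = t.toList := by
    have h3 := congrArg String.toList h2
    simpa using h3
  have := length_cutA_lt t.toList substring.toList hinf hsp hh
  rw [htl] at this
  omega
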